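-- pv_equiv track=rewrite | github.com/hts-group/TransitIQ-connectors | archive-and-reference/transitiq_connectors/conformance_scorecards.py | _mapping_drift_counts
-- ===== SOURCE A (Python) =====
-- def _mapping_drift_counts(baseline: dict[str, str], current: dict[str, str]) -> dict[str, int]:
--     baseline_keys = set(baseline.keys())
--     current_keys = set(current.keys())
--
--     changed = 0
--     for key in baseline_keys.intersection(current_keys):
--         if baseline[key] != current[key]:
--             changed += 1
--
--     removed = len(baseline_keys - current_keys)
--     added = len(current_keys - baseline_keys)
--     return {
--         "changed": changed,
--         "removed": removed,
--         "added": added,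
--     }
-- ===== SOURCE B (Python) =====
-- def _mapping_drift_counts(baseline: dict[str, str], current: dict[str, str]) -> dict[str, int]:
--     bks = sorted(baseline)
--     cks = sorted(current)
--     i = j = changed = removed = added = 0
--     while i < len(bks) and j < len(cks):
--         bk, ck = bks[i], cks[j]
--         if bk == ck:
--             if baseline[bk] != current[ck]:
--                 changed += 1
--             i += 1
--             j += 1
--         elif bk < ck:
--             removed += 1
--             i += 1
--         else:
--             added += 1
--             j += 1
--     removed += len(bks) - i
--     added += len(cks) - j
--     return {"changed": changed, "removed": removed, "added": added}
-- ===== Notes on version B (the rewrite author's own statement) =====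
-- stated objective: alternative
-- what changed: Replaced the hash-set intersection/difference computations by sorting both key lists and classifying keys with a single two-pointer merge of the sorted sequences, with the leftover tails counting as removed/added.
import Mathlib
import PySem

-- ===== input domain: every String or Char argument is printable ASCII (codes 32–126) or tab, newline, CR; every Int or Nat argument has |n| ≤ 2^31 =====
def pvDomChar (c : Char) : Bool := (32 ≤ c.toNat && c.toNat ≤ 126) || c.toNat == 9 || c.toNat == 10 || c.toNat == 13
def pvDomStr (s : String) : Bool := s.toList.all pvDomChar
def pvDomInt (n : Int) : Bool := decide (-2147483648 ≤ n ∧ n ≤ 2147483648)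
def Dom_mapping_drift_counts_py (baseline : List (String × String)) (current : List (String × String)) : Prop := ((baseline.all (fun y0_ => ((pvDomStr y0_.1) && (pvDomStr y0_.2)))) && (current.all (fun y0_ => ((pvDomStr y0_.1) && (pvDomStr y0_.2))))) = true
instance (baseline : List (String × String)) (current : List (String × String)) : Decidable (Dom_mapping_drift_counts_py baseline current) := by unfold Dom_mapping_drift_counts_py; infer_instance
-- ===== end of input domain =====

-- B replaces A's three hash-set operations by sorting both key lists and classifying
-- the keys in a single two-pointer merge; equal return values on all inputs.

-- ===== PORT A =====
def mapping_drift_counts_py (baseline : List (String × String)) (current : List (String × String)) : List (String × Int) :=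
  let b := PySem.Dict.ofList baseline
  let c := PySem.Dict.ofList current
  let baseline_keys := PySem.Set.ofList b.keys
  let current_keys := PySem.Set.ofList c.keys
  -- count over the intersection set: the result is a count, independent of set iteration order
  let changed : Int := (PySem.Set.inter baseline_keys current_keys).foldl
      (fun acc key => if b.get? key ≠ c.get? key then acc + 1 else acc) 0
  let removed : Int := PySem.Set.len (PySem.Set.diff baseline_keys current_keys)
  let added : Int := PySem.Set.len (PySem.Set.diff current_keys baseline_keys)
  [("changed", changed), ("removed", removed), ("added", added)]

-- ===== PORT B =====
-- B's while-loop as a recursion on the two sorted key lists; the base cases add the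
-- leftover tail lengths exactly as the two 'removed += …' / 'added += …' lines do.
-- baseline[bk] / current[ck] are ported as get? on keys the merge has just seen in
-- both lists, where Python's lookup returns (exact: both lookups are 'some').
def pvMergeGo (b c : PySem.Dict String String) : List String → List String → Int × Int × Int
  | [], cks => (0, 0, (cks.length : Int))
  | bk :: bt, [] => (0, ((bk :: bt).length : Int), 0)
  | bk :: bt, ck :: ct =>
    if bk = ck then
      let r := pvMergeGo b c bt ct
      (if b.get? bk ≠ c.get? ck then r.1 + 1 else r.1, r.2.1, r.2.2)
    else if bk < ck then
      let r := pvMergeGo b c bt (ck :: ct)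
      (r.1, r.2.1 + 1, r.2.2)
    else
      let r := pvMergeGo b c (bk :: bt) ct
      (r.1, r.2.1, r.2.2 + 1)
  termination_by l₁ l₂ => l₁.length + l₂.length
  decreasing_by all_goals first | (simp; omega) | simp

def mapping_drift_counts_py_alt (baseline : List (String × String)) (current : List (String × String)) : List (String × Int) :=
  let b := PySem.Dict.ofList baseline
  let c := PySem.Dict.ofList current
  let bks := PySem.List.sorted b.keys (fun x => x) false
  let cks := PySem.List.sorted c.keys (fun x => x) false
  let r := pvMergeGo b c bks cks
  [("changed", r.1), ("removed", r.2.1), ("added", r.2.2)]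

-- ===== PRECONDITION & SPEC =====
def Spec_mapping_drift_counts_py (baseline : List (String × String)) (current : List (String × String)) (out : List (String × Int)) : Prop := out = mapping_drift_counts_py_alt baseline current
instance (baseline : List (String × String)) (current : List (String × String)) (out : List (String × Int)) : Decidable (Spec_mapping_drift_counts_py baseline current out) := by unfold Spec_mapping_drift_counts_py; infer_instance

-- ===== CLAIM (what is proved, stated in full; the proofs are below) =====
def Claim_equal_mapping_drift_counts_py : Prop := ∀ (baseline : List (String × String)) (current : List (String × String)), Dom_mapping_drift_counts_py baseline current → Spec_mapping_drift_counts_py baseline current (mapping_drift_counts_py baseline current)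

-- ===== LEMMAS AND PROOFS =====

-- the merge over two strictly key-increasing lists computes the three classification counts
theorem pvMergeGo_eq (b c : PySem.Dict String String) (l₁ l₂ : List String)
    (h₁ : l₁.Pairwise (· < ·)) (h₂ : l₂.Pairwise (· < ·)) :
    pvMergeGo b c l₁ l₂ =
      ((l₁.countP (fun k => l₂.contains k && decide (b.get? k ≠ c.get? k)) : Int),
       (l₁.countP (fun k => !l₂.contains k) : Int),
       (l₂.countP (fun k => !l₁.contains k) : Int)) := by
  fun_induction pvMergeGo b c l₁ l₂ with
  | case1 cks => simp
  | case2 bk bt => simp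
  | case3 bt k ct r ih =>
    rcases List.pairwise_cons.mp h₁ with ⟨hb1, hb2⟩
    rcases List.pairwise_cons.mp h₂ with ⟨hc1, hc2⟩
    have hr : r = ((bt.countP (fun k => ct.contains k && decide (b.get? k ≠ c.get? k)) : Int),
        (bt.countP (fun k => !ct.contains k) : Int),
        (ct.countP (fun k => !bt.contains k) : Int)) := ih hb2 hc2
    rw [hr]
    have e1 : bt.countP (fun x => (k :: ct).contains x && decide (b.get? x ≠ c.get? x))
        = bt.countP (fun x => ct.contains x && decide (b.get? x ≠ c.get? x)) := by
      apply List.countP_congr; intro x hx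
      have : x ≠ k := ne_of_gt (hb1 x hx)
      simp [this]
    have e2 : bt.countP (fun x => !(k :: ct).contains x)
        = bt.countP (fun x => !ct.contains x) := by
      apply List.countP_congr; intro x hx
      have : x ≠ k := ne_of_gt (hb1 x hx)
      simp [this]
    have e3 : ct.countP (fun x => !(k :: bt).contains x)
        = ct.countP (fun x => !bt.contains x) := by
      apply List.countP_congr; intro x hx
      have : x ≠ k := ne_of_gt (hc1 x hx)
      simp [this]
    simp only [List.countP_cons, Prod.mk.injEq]
    rw [e1, e2, e3]
    refine ⟨?_, ?_, ?_⟩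
    · by_cases hv : b.get? k ≠ c.get? k <;> simp [hv]
    · simp
    · simp
  | case4 bk bt ck ct hne hlt r ih =>
    rcases List.pairwise_cons.mp h₁ with ⟨hb1, hb2⟩
    rcases List.pairwise_cons.mp h₂ with ⟨hc1, hc2⟩
    have hr : r = (((bt.countP (fun k => (ck :: ct).contains k && decide (b.get? k ≠ c.get? k)) : Nat) : Int),
        ((bt.countP (fun k => !(ck :: ct).contains k) : Nat) : Int),
        (((ck :: ct).countP (fun k => !bt.contains k) : Nat) : Int)) := ih hb2 h₂
    rw [hr]
    have hnb2 : bk ∉ ct := fun hm => absurd rfl (ne_of_gt (lt_trans hlt (hc1 bk hm)))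
    have e3 : (ck :: ct).countP (fun k => !(bk :: bt).contains k)
        = (ck :: ct).countP (fun k => !bt.contains k) := by
      apply List.countP_congr; intro k hk
      have hkge : ck ≤ k := by
        rcases List.mem_cons.mp hk with h | h
        · exact le_of_eq h.symm
        · exact le_of_lt (hc1 k h)
      have : k ≠ bk := ne_of_gt (lt_of_lt_of_le hlt hkge)
      simp [this]
    rw [e3]
    simp only [List.countP_cons, Prod.mk.injEq]
    refine ⟨?_, ?_, ?_⟩ <;> simp [hne, hnb2]
  | case5 bk bt ck ct hne hnlt r ih =>
    rcases List.pairwise_cons.mp h₁ with ⟨hb1, hb2⟩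
    rcases List.pairwise_cons.mp h₂ with ⟨hc1, hc2⟩
    have hr : r = ((((bk :: bt).countP (fun k => ct.contains k && decide (b.get? k ≠ c.get? k)) : Nat) : Int),
        (((bk :: bt).countP (fun k => !ct.contains k) : Nat) : Int),
        ((ct.countP (fun k => !(bk :: bt).contains k) : Nat) : Int)) := ih h₁ hc2
    rw [hr]
    have hgt : ck < bk := lt_of_le_of_ne (not_lt.mp hnlt) (Ne.symm hne)
    have hcb : ck ∉ bt := fun hm => absurd rfl (ne_of_gt (lt_trans hgt (hb1 ck hm)))
    have hne' : ¬ck = bk := fun h => hne h.symm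
    have hble : ∀ k ∈ bk :: bt, k ≠ ck := fun k hk =>
      ne_of_gt (lt_of_lt_of_le hgt (by
        rcases List.mem_cons.mp hk with h | h
        · exact le_of_eq h.symm
        · exact le_of_lt (hb1 k h)))
    have e1 : (bk :: bt).countP (fun k => (ck :: ct).contains k && decide (b.get? k ≠ c.get? k))
        = (bk :: bt).countP (fun k => ct.contains k && decide (b.get? k ≠ c.get? k)) := by
      apply List.countP_congr; intro k hk
      simp [hble k hk]
    have e2 : (bk :: bt).countP (fun k => !(ck :: ct).contains k)
        = (bk :: bt).countP (fun k => !ct.contains k) := by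
      apply List.countP_congr; intro k hk
      simp [hble k hk]
    rw [e1, e2]
    simp only [List.countP_cons, Prod.mk.injEq]
    refine ⟨?_, ?_, ?_⟩ <;> simp [hne', hcb]

-- ===== VERDICT (by name: the statement is the Claim_ definition above) =====
theorem mapping_drift_counts_py_spec : Claim_equal_mapping_drift_counts_py := by
  intro baseline current _
  unfold Spec_mapping_drift_counts_py mapping_drift_counts_py mapping_drift_counts_py_alt
  simp only []
  set b := PySem.Dict.ofList baseline with hb
  set c := PySem.Dict.ofList current with hc
  have hbn : b.keys.Nodup := PySem.Dict.nodup_keys_ofList baseline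
  have hcn : c.keys.Nodup := PySem.Dict.nodup_keys_ofList current
  -- B side: the merge computes the three counts over the sorted key lists
  have hsb : (PySem.List.sorted b.keys (fun x => x) false).Pairwise (· < ·) := by
    have := PySem.List.sorted_ofList_pairwise_lt b.keys
    rwa [PySem.Set.ofList_eq_self_of_nodup _ hbn] at this
  have hsc : (PySem.List.sorted c.keys (fun x => x) false).Pairwise (· < ·) := by
    have := PySem.List.sorted_ofList_pairwise_lt c.keys
    rwa [PySem.Set.ofList_eq_self_of_nodup _ hcn] at this
  rw [pvMergeGo_eq b c _ _ hsb hsc]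
  -- A side: the intersection fold is a countP; the diffs are filter lengths
  rw [PySem.Set.ofList_eq_self_of_nodup _ hbn, PySem.Set.ofList_eq_self_of_nodup _ hcn]
  have hfold : ∀ (l : List String),
      l.foldl (fun acc key => if b.get? key ≠ c.get? key then acc + 1 else acc) 0
      = ((l.countP (fun key => decide (b.get? key ≠ c.get? key)) : Nat) : Int) := by
    intro l
    have := PySem.List.foldl_count_if (fun key => decide (b.get? key ≠ c.get? key)) l 0
    simpa using this
  -- membership in the B-side sorted lists equals membership in the key lists
  have hpb := PySem.List.sorted_perm b.keys (fun x => x) false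
  have hpc := PySem.List.sorted_perm c.keys (fun x => x) false
  have hchanged :
      ((PySem.List.sorted b.keys (fun x => x) false).countP
        (fun k => (PySem.List.sorted c.keys (fun x => x) false).contains k
                  && decide (b.get? k ≠ c.get? k)) : Int)
      = (PySem.Set.inter (b.keys) (c.keys)).foldl
          (fun acc key => if b.get? key ≠ c.get? key then acc + 1 else acc) 0 := by
    show _ = (List.filter (fun x => PySem.Set.contains (c.keys) x) b.keys).foldl _ _
    rw [hfold, List.countP_filter]
    rw [hpb.countP_eq]
    congr 1
    apply List.countP_congr
    intro k _
    rw [PySem.Set.contains_eq_listContains]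
    simp only [Bool.and_eq_true, List.contains_eq_mem, decide_eq_true_eq, hpc.mem_iff]
    exact and_comm
  have hremoved :
      ((PySem.List.sorted b.keys (fun x => x) false).countP
        (fun k => !(PySem.List.sorted c.keys (fun x => x) false).contains k) : Int)
      = PySem.Set.len (PySem.Set.diff (b.keys) (c.keys)) := by
    show _ = ((List.filter (fun x => !PySem.Set.contains (c.keys) x) b.keys).length : Int)
    rw [← List.countP_eq_length_filter, hpb.countP_eq]
    congr 1
    apply List.countP_congr
    intro k _
    rw [PySem.Set.contains_eq_listContains]
    simp only [List.contains_eq_mem, decide_eq_false_iff_not,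
      Bool.not_eq_eq_eq_not, Bool.not_true]
    rw [hpc.mem_iff]
  have hadded :
      ((PySem.List.sorted c.keys (fun x => x) false).countP
        (fun k => !(PySem.List.sorted b.keys (fun x => x) false).contains k) : Int)
      = PySem.Set.len (PySem.Set.diff (c.keys) (b.keys)) := by
    show _ = ((List.filter (fun x => !PySem.Set.contains (b.keys) x) c.keys).length : Int)
    rw [← List.countP_eq_length_filter, hpc.countP_eq]
    congr 1
    apply List.countP_congr
    intro k _
    rw [PySem.Set.contains_eq_listContains]
    simp only [List.contains_eq_mem, decide_eq_false_iff_not,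
      Bool.not_eq_eq_eq_not, Bool.not_true]
    rw [hpb.mem_iff]
  rw [hchanged, hremoved, hadded]
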